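-- pv_equiv track=rewrite | github.com/beatriz-crf/llm_proj | planner.py | _get_operation_category
-- ===== SOURCE A (Python) =====
-- def _get_operation_category(operation_name: str) -> str | None:
--     """Maps a detailed operation name to a general category used in material constraints."""
--     if not operation_name: return None
--     op_lower = operation_name.lower()
--
--     if any(kw in op_lower for kw in ["milling", "face", "facing", "roughing", "finishing", "contouring", "pocketing", "chamfering"]):
--         return "milling"
--     if "drilling" in op_lower: return "drilling"
--     if "reaming" in op_lower: return "reaming"
--     if "tapping" in op_lower: return "tapping"
--     return None
-- ===== SOURCE B (Python) =====
-- # Text-driven multi-pattern scan: walk the string once, at each position test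
-- # which keywords START there, and keep the best (lowest) category rank seen.
-- # Correct because the original's precedence is exactly "lowest-ranked category
-- # whose keyword occurs anywhere": every milling keyword maps to the same
-- # category, so within a rank the keyword order never matters.
--
-- _KW_RANK = [
--     ("milling", 0), ("face", 0), ("facing", 0), ("roughing", 0),
--     ("finishing", 0), ("contouring", 0), ("pocketing", 0), ("chamfering", 0),
--     ("drilling", 1), ("reaming", 2), ("tapping", 3),
-- ]
-- _CATS = ["milling", "drilling", "reaming", "tapping"]
--
-- def _get_operation_category(operation_name: str) -> str | None:
--     if not operation_name:
--         return None
--     op = operation_name.lower()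
--     best = None
--     for i in range(len(op)):
--         for kw, rank in _KW_RANK:
--             if op.startswith(kw, i) and (best is None or rank < best):
--                 best = rank
--     return _CATS[best] if best is not None else None
-- ===== Notes on version B (the rewrite author's own statement) =====
-- stated objective: alternative
-- what changed: Replaces the keyword-driven chain of substring-membership tests by a text-driven scan: one pass over the string's positions testing which keywords start at each position, accumulating the minimum category rank, then mapping that rank to its category.
import Mathlib
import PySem

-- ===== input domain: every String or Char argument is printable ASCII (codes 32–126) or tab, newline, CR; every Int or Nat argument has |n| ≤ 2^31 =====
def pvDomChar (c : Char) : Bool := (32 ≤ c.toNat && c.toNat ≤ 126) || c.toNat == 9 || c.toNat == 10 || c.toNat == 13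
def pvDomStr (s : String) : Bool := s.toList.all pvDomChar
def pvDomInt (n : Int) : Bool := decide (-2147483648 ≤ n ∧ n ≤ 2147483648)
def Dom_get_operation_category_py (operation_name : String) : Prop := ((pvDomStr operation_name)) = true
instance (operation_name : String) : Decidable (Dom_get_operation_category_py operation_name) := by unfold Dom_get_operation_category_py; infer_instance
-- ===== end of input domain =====

-- B replaces the keyword-driven chain of substring tests by a text-driven scan: one walk over the
-- string's positions testing which keywords start there, keeping the minimum category rank (alternative).

-- ===== PORT A =====
def get_operation_category_py (operation_name : String) : Option String :=
  if operation_name = "" then none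
  else
    let op_lower := PySem.Str.lower operation_name
    if (["milling", "face", "facing", "roughing", "finishing", "contouring", "pocketing", "chamfering"].any
        (fun kw => PySem.Str.isIn kw op_lower)) then some "milling"
    else if PySem.Str.isIn "drilling" op_lower then some "drilling"
    else if PySem.Str.isIn "reaming" op_lower then some "reaming"
    else if PySem.Str.isIn "tapping" op_lower then some "tapping"
    else none

-- ===== PORT B =====
def kwRank : List (String × Nat) :=
  [("milling", 0), ("face", 0), ("facing", 0), ("roughing", 0),
   ("finishing", 0), ("contouring", 0), ("pocketing", 0), ("chamfering", 0),
   ("drilling", 1), ("reaming", 2), ("tapping", 3)]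

def catNames : List String := ["milling", "drilling", "reaming", "tapping"]

-- inner loop of B: at the suffix s (the text from position i on), fold the keyword/rank table
-- keeping the lowest rank of a keyword that starts here
def updB (s : List Char) (b : Option Nat) (p : String × Nat) : Option Nat :=
  if PySem.Chars.startswith s p.1.toList && (match b with | none => true | some m => decide (p.2 < m))
  then some p.2 else b

def stepB (s : List Char) (b : Option Nat) : Option Nat := kwRank.foldl (updB s) b

-- outer loop of B: for i in range(len(op)) — structural recursion over the suffixes of the text
def scanB : List Char → Option Nat → Option Nat
  | [], best => best
  | c :: rest, best => scanB rest (stepB (c :: rest) best)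

def get_operation_category_py_alt (operation_name : String) : Option String :=
  if operation_name = "" then none
  else
    let op := (PySem.Str.lower operation_name).toList
    match scanB op none with
    | some r => PySem.List.pyGet? catNames (Int.ofNat r)   -- _CATS[best]
    | none => none

-- ===== PRECONDITION & SPEC =====
def Spec_get_operation_category_py (operation_name : String) (out : Option String) : Prop := out = get_operation_category_py_alt operation_name
instance (operation_name : String) (out : Option String) : Decidable (Spec_get_operation_category_py operation_name out) := by unfold Spec_get_operation_category_py; infer_instance

-- ===== CLAIM (what is proved, stated in full; the proofs are below) =====
def Claim_equal_get_operation_category_py : Prop := ∀ (operation_name : String), Dom_get_operation_category_py operation_name → Spec_get_operation_category_py operation_name (get_operation_category_py operation_name)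

-- ===== LEMMAS AND PROOFS =====

-- minimum on Option Nat (none = "nothing found yet")
def omin : Option Nat → Option Nat → Option Nat
  | none, b => b
  | a, none => a
  | some x, some y => some (min x y)

theorem omin_none_left (b : Option Nat) : omin none b = b := by cases b <;> rfl
theorem omin_none_right (b : Option Nat) : omin b none = b := by cases b <;> rfl
theorem omin_assoc (a b c : Option Nat) : omin (omin a b) c = omin a (omin b c) := by
  cases a <;> cases b <;> cases c <;> simp [omin, Nat.min_assoc]

theorem updB_eq (s : List Char) (b : Option Nat) (p : String × Nat) :
    updB s b p = omin b (if PySem.Chars.startswith s p.1.toList then some p.2 else none) := by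
  rcases b with _ | m <;> simp [updB, omin] <;>
    rcases h : PySem.Chars.startswith s p.1.toList <;> simp <;> split_ifs <;> simp [omin] <;> omega

theorem stepB_shift (s : List Char) (b : Option Nat) :
    stepB s b = omin b (stepB s none) := by
  have gen : ∀ (l : List (String × Nat)) (b : Option Nat),
      l.foldl (updB s) b = omin b (l.foldl (updB s) none) := by
    intro l
    induction l with
    | nil => intro b; simp [List.foldl, omin_none_right]
    | cons p rest ih =>
      intro b
      simp only [List.foldl_cons]
      rw [ih (updB s b p), ih (updB s none p), updB_eq s b p, updB_eq s none p,
        omin_none_left, omin_assoc]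
  exact gen kwRank b

theorem scanB_shift (l : List Char) (b : Option Nat) :
    scanB l b = omin b (scanB l none) := by
  induction l generalizing b with
  | nil => simp [scanB, omin_none_right]
  | cons c rest ih =>
    simp only [scanB]
    rw [ih (stepB (c :: rest) b), ih (stepB (c :: rest) none),
      stepB_shift (c :: rest) b, omin_assoc]

-- the keywords of each category rank, in A's order
def kwsOf : Nat → List String
  | 0 => ["milling", "face", "facing", "roughing", "finishing", "contouring", "pocketing", "chamfering"]
  | 1 => ["drilling"]
  | 2 => ["reaming"]
  | 3 => ["tapping"]
  | _ => []

def swB (r : Nat) (s : List Char) : Bool := (kwsOf r).any (fun kw => PySem.Chars.startswith s kw.toList)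
def inB (r : Nat) (l : List Char) : Bool := (kwsOf r).any (fun kw => PySem.Chars.isIn kw.toList l)

theorem omin_some_if (r r' : Nat) (c : Prop) [Decidable c] (h : r ≤ r') :
    omin (some r) (if c then some r' else none) = some r := by
  split_ifs <;> simp [omin, Nat.min_eq_left h]

theorem stepB_char (s : List Char) :
    stepB s none = if swB 0 s then some 0 else if swB 1 s then some 1
      else if swB 2 s then some 2 else if swB 3 s then some 3 else none := by
  simp only [stepB, kwRank, List.foldl_cons, List.foldl_nil, updB_eq, omin_none_left]
  by_cases h1 : PySem.Chars.startswith s "milling".toList = true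
  · simp_all [swB, kwsOf, omin_some_if, omin_none_left, omin_none_right]
  by_cases h2 : PySem.Chars.startswith s "face".toList = true
  · simp_all [swB, kwsOf, omin_some_if, omin_none_left, omin_none_right]
  by_cases h3 : PySem.Chars.startswith s "facing".toList = true
  · simp_all [swB, kwsOf, omin_some_if, omin_none_left, omin_none_right]
  by_cases h4 : PySem.Chars.startswith s "roughing".toList = true
  · simp_all [swB, kwsOf, omin_some_if, omin_none_left, omin_none_right]
  by_cases h5 : PySem.Chars.startswith s "finishing".toList = true
  · simp_all [swB, kwsOf, omin_some_if, omin_none_left, omin_none_right]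
  by_cases h6 : PySem.Chars.startswith s "contouring".toList = true
  · simp_all [swB, kwsOf, omin_some_if, omin_none_left, omin_none_right]
  by_cases h7 : PySem.Chars.startswith s "pocketing".toList = true
  · simp_all [swB, kwsOf, omin_some_if, omin_none_left, omin_none_right]
  by_cases h8 : PySem.Chars.startswith s "chamfering".toList = true
  · simp_all [swB, kwsOf, omin_some_if, omin_none_left, omin_none_right]
  by_cases h9 : PySem.Chars.startswith s "drilling".toList = true
  · simp_all [swB, kwsOf, omin_some_if, omin_none_left, omin_none_right]
  by_cases h10 : PySem.Chars.startswith s "reaming".toList = true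
  · simp_all [swB, kwsOf, omin_some_if, omin_none_left, omin_none_right]
  by_cases h11 : PySem.Chars.startswith s "tapping".toList = true
  · simp_all [swB, kwsOf, omin_some_if, omin_none_left, omin_none_right]
  simp_all [swB, kwsOf, omin_none_left]

theorem isIn_cons_eq (kw : List Char) (c : Char) (rest : List Char) :
    PySem.Chars.isIn kw (c :: rest)
      = (PySem.Chars.startswith (c :: rest) kw || PySem.Chars.isIn kw rest) := by
  by_cases hp : kw <+: (c :: rest)
  · have h1 : PySem.Chars.startswith (c :: rest) kw = true := (PySem.Chars.startswith_iff _ _).mpr hp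
    have h2 : PySem.Chars.isIn kw (c :: rest) = true :=
      (PySem.Chars.isIn_iff_infix _ _).mpr (List.infix_cons_iff.mpr (Or.inl hp))
    simp [h1, h2]
  · have h1 : PySem.Chars.startswith (c :: rest) kw = false := by
      rw [Bool.eq_false_iff]; intro h; exact hp ((PySem.Chars.startswith_iff _ _).mp h)
    by_cases hi : kw <:+: rest
    · have h2 : PySem.Chars.isIn kw rest = true := (PySem.Chars.isIn_iff_infix _ _).mpr hi
      have h3 : PySem.Chars.isIn kw (c :: rest) = true :=
        (PySem.Chars.isIn_iff_infix _ _).mpr (List.infix_cons_iff.mpr (Or.inr hi))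
      simp [h1, h2, h3]
    · have h4 : PySem.Chars.isIn kw (c :: rest) = false :=
        (PySem.Chars.isIn_eq_false_iff _ _).mpr (by rw [List.infix_cons_iff]; tauto)
      have h5 : PySem.Chars.isIn kw rest = false := (PySem.Chars.isIn_eq_false_iff _ _).mpr hi
      simp [h1, h4, h5]

theorem inB_cons (r : Nat) (c : Char) (rest : List Char) :
    inB r (c :: rest) = (swB r (c :: rest) || inB r rest) := by
  simp only [inB, swB]
  induction kwsOf r with
  | nil => simp
  | cons kw ks ih =>
    simp only [List.any_cons, isIn_cons_eq] at ih ⊢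
    rcases PySem.Chars.startswith (c :: rest) kw.toList <;>
      rcases PySem.Chars.isIn kw.toList rest <;> simp [ih]

def rankIf (l : List Char) : Option Nat :=
  if inB 0 l then some 0 else if inB 1 l then some 1
  else if inB 2 l then some 2 else if inB 3 l then some 3 else none

theorem omin_zero_right (x : Option Nat) : omin x (some 0) = some 0 := by
  cases x <;> simp [omin]
theorem omin_zero_left (x : Option Nat) : omin (some 0) x = some 0 := by
  cases x <;> simp [omin]

theorem scanB_char (l : List Char) : scanB l none = rankIf l := by
  induction l with
  | nil => simp [scanB, rankIf, inB, kwsOf]; decide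
  | cons c rest ih =>
    simp only [scanB]
    rw [scanB_shift rest (stepB (c :: rest) none), ih, stepB_char]
    simp only [rankIf, inB_cons]
    by_cases s0 : swB 0 (c :: rest) = true
    · simp [s0, omin_zero_left]
    by_cases i0 : inB 0 rest = true
    · simp [s0, i0, omin_zero_right]
    by_cases s1 : swB 1 (c :: rest) = true
    · by_cases i1 : inB 1 rest = true <;>
        simp [s0, i0, s1, i1, omin] <;> split_ifs <;> simp [omin]
    by_cases i1 : inB 1 rest = true
    · simp [s0, i0, s1, i1, omin] <;> split_ifs <;> simp [omin]
    by_cases s2 : swB 2 (c :: rest) = true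
    · by_cases i2 : inB 2 rest = true <;>
        simp [s0, i0, s1, i1, s2, i2, omin] <;> split_ifs <;> simp [omin]
    by_cases i2 : inB 2 rest = true
    · simp [s0, i0, s1, i1, s2, i2, omin] <;> split_ifs <;> simp [omin]
    by_cases s3 : swB 3 (c :: rest) = true
    · by_cases i3 : inB 3 rest = true <;> simp [s0, i0, s1, i1, s2, i2, s3, i3, omin]
    by_cases i3 : inB 3 rest = true
    · simp [s0, i0, s1, i1, s2, i2, s3, i3, omin]
    simp [s0, i0, s1, i1, s2, i2, s3, i3, omin_none_left]

-- ===== VERDICT (by name: the statement is the Claim_ definition above) =====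
theorem get_operation_category_py_spec : Claim_equal_get_operation_category_py := by
  intro s _
  unfold Spec_get_operation_category_py get_operation_category_py get_operation_category_py_alt
  by_cases h0 : s = ""
  · simp [h0]
  · simp only [if_neg h0]
    rw [scanB_char]
    simp only [rankIf]
    by_cases b0 : inB 0 (PySem.Str.lower s).toList = true
    · simp_all [inB, kwsOf, catNames, PySem.List.pyGet?, PySem.List.pyIdx?]
    by_cases b1 : inB 1 (PySem.Str.lower s).toList = true
    · simp_all [inB, kwsOf, catNames, PySem.List.pyGet?, PySem.List.pyIdx?]
    by_cases b2 : inB 2 (PySem.Str.lower s).toList = true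
    · simp_all [inB, kwsOf, catNames, PySem.List.pyGet?, PySem.List.pyIdx?]
    by_cases b3 : inB 3 (PySem.Str.lower s).toList = true
    · simp_all [inB, kwsOf, catNames, PySem.List.pyGet?, PySem.List.pyIdx?]
    simp_all [inB, kwsOf]
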